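-- pv_equiv track=rewrite | github.com/capseal/capseal | BEF-main/scripts/stc_aok.py | chunk_sketch
-- ===== SOURCE A (Python) =====
-- from typing import Dict, Iterable, List, Optional, Sequence
--
-- MODULUS = (1 << 61) - 1
--
-- def pow_mul(base: int, exp: int) -> int:
--     return pow(base % MODULUS, exp, MODULUS)
--
-- def chunk_sketch(values: Sequence[int], offset: int, challenges: Sequence[int]) -> List[int]:
--     sketches: List[int] = []
--     for r in challenges:
--         acc = 0
--         pow_r = pow_mul(r, offset)
--         for val in values:
--             acc = (acc + (val % MODULUS) * pow_r) % MODULUS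
--             pow_r = (pow_r * r) % MODULUS
--         sketches.append(acc)
--     return sketches
-- ===== SOURCE B (Python) =====
-- from typing import List, Sequence
--
-- MODULUS = (1 << 61) - 1
--
-- def chunk_sketch(values: Sequence[int], offset: int, challenges: Sequence[int]) -> List[int]:
--     # Horner's rule over the values in reverse, then one multiplication by r^offset.
--     out: List[int] = []
--     for r in challenges:
--         s = 0
--         for val in reversed(values):
--             s = (s * r + val % MODULUS) % MODULUS
--         out.append((s * pow(r % MODULUS, offset, MODULUS)) % MODULUS)
--     return out
-- ===== Notes on version B (the rewrite author's own statement) =====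
-- stated objective: alternative
-- what changed: Per challenge, the incrementally maintained power pow_r is dropped: B evaluates the polynomial by Horner's rule over the values in reverse order and multiplies once by r^offset at the end.
import Mathlib
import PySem

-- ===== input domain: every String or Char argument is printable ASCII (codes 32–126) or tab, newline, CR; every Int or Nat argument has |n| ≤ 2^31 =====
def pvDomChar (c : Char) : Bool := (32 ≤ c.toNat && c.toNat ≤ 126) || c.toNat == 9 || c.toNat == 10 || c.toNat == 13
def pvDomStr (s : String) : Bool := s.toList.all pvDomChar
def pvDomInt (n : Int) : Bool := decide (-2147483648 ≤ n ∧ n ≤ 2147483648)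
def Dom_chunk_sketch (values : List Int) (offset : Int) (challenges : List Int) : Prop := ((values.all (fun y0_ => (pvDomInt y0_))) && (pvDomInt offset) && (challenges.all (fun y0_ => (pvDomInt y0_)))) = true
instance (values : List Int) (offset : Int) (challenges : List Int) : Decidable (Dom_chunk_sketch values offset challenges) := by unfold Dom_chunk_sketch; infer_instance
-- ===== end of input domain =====

-- B replaces A's incrementally maintained power pow_r by Horner's rule over the values in
-- reverse order, multiplying once by r^offset at the end (alternative decomposition, same cost).


-- MODULUS = (1 << 61) - 1
def pvM : Int := 2305843009213693951

-- pow(b, e, m) by the square-and-multiply loop CPython's pow performs (PySem.Int.powMod computes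
-- b ^ e literally, which is infeasible for exponents up to 2^31); exact for m > 1 and b ≥ 0.
def pvPowMod (b e m : Nat) : Nat :=
  if e = 0 then 1 % m
  else
    let h := pvPowMod (b * b % m) (e / 2) m
    if e % 2 = 1 then h * b % m else h
  termination_by e
  decreasing_by exact Nat.div_lt_self (Nat.pos_of_ne_zero (by assumption)) (by omega)

-- pow(base % MODULUS, exp, MODULUS); a negative exp is Python's modular inverse (MODULUS is
-- prime, so inverse = b^(MODULUS-2)); Python raises ValueError when MODULUS ∣ base and exp < 0 —
-- exactly the inputs Pre_ excludes.
def pvPowMul (base exp : Int) : Int :=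
  let b : Nat := (PySem.Int.mod base pvM).toNat
  let m : Nat := pvM.toNat
  if 0 ≤ exp then ((pvPowMod b exp.toNat m : Nat) : Int)
  else ((pvPowMod (pvPowMod b (m - 2) m) exp.natAbs m : Nat) : Int)

-- ===== PORT A =====
-- the inner 'for val in values' loop of A, state (acc, pow_r)
def chunkLoopA (r : Int) : List Int → Int → Int → Int
  | [], acc, _ => acc
  | v :: vs, acc, powr =>
      chunkLoopA r vs (PySem.Int.mod (acc + (PySem.Int.mod v pvM) * powr) pvM)
        (PySem.Int.mod (powr * r) pvM)

def chunk_sketch (values : List Int) (offset : Int) (challenges : List Int) : List Int :=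
  challenges.foldl (fun sketches r => sketches ++ [chunkLoopA r values 0 (pvPowMul r offset)]) []

-- ===== PORT B =====
def chunk_sketch_alt (values : List Int) (offset : Int) (challenges : List Int) : List Int :=
  challenges.map (fun r =>
    -- 'for val in reversed(values)' with s = (s * r + val % MODULUS) % MODULUS
    let s := values.foldr (fun v acc => PySem.Int.mod (acc * r + PySem.Int.mod v pvM) pvM) 0
    PySem.Int.mod (s * pvPowMul r offset) pvM)

-- ===== PRECONDITION & SPEC =====
-- Pre_ excludes only the inputs where Python A raises ValueError: a negative offset together
-- with a challenge divisible by MODULUS (pow cannot invert it); B raises there too.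
def Pre_chunk_sketch (values : List Int) (offset : Int) (challenges : List Int) : Prop :=
  offset < 0 → ∀ r ∈ challenges, PySem.Int.mod r pvM ≠ 0
instance (values : List Int) (offset : Int) (challenges : List Int) : Decidable (Pre_chunk_sketch values offset challenges) := by unfold Pre_chunk_sketch; infer_instance

def pvWitness_chunk_sketch : List Int × Int × List Int := ([5, -3, 12], 2, [7, -2, 0])

def Spec_chunk_sketch (values : List Int) (offset : Int) (challenges : List Int) (out : List Int) : Prop := out = chunk_sketch_alt values offset challenges
instance (values : List Int) (offset : Int) (challenges : List Int) (out : List Int) : Decidable (Spec_chunk_sketch values offset challenges out) := by unfold Spec_chunk_sketch; infer_instance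

-- ===== CLAIM (what is proved, stated in full; the proofs are below) =====
def Claim_equal_chunk_sketch : Prop := ∀ (values : List Int) (offset : Int) (challenges : List Int), Dom_chunk_sketch values offset challenges → Pre_chunk_sketch values offset challenges → Spec_chunk_sketch values offset challenges (chunk_sketch values offset challenges)

-- ===== LEMMAS AND PROOFS =====

theorem pvM_pos : (0 : Int) < pvM := by decide

-- the Horner accumulator of B for one challenge, written with Lean's % (= Python % here, pvM > 0)
def hornerB (r : Int) (vs : List Int) : Int :=
  vs.foldr (fun v acc => (acc * r + v % pvM) % pvM) 0

theorem hornerB_eq_foldr (r : Int) (vs : List Int) :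
    vs.foldr (fun v acc => PySem.Int.mod (acc * r + PySem.Int.mod v pvM) pvM) 0 = hornerB r vs := by
  induction vs with
  | nil => rfl
  | cons v vs ih =>
      rw [List.foldr_cons, ih]
      simp only [hornerB, List.foldr_cons, PySem.Int.mod_eq_emod_of_pos pvM_pos]

theorem loopA_eq (r : Int) (vs : List Int) : ∀ (acc p : Int), acc % pvM = acc →
    chunkLoopA r vs acc p = (acc + hornerB r vs * p) % pvM := by
  induction vs with
  | nil =>
      intro acc p h
      simp [chunkLoopA, hornerB, h]
  | cons v vs ih =>
      intro acc p h
      have hm : ∀ a : Int, a % pvM ≡ a [ZMOD pvM] := fun a => by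
        have := Int.emod_emod_of_dvd a (dvd_refl pvM)
        simp [Int.ModEq]
      simp only [chunkLoopA, hornerB, List.foldr_cons,
        PySem.Int.mod_eq_emod_of_pos pvM_pos]
      rw [ih _ _ (Int.emod_emod_of_dvd _ (dvd_refl pvM))]
      show ((acc + v % pvM * p) % pvM + hornerB r vs * (p * r % pvM)) % pvM
          = (acc + (hornerB r vs * r + v % pvM) % pvM * p) % pvM
      have h1 : (acc + v % pvM * p) % pvM + hornerB r vs * (p * r % pvM)
          ≡ (acc + v % pvM * p) + hornerB r vs * (p * r) [ZMOD pvM] :=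
        (hm _).add ((hm _).mul_left (hornerB r vs))
      have h2 : acc + (hornerB r vs * r + v % pvM) % pvM * p
          ≡ acc + (hornerB r vs * r + v % pvM) * p [ZMOD pvM] :=
        (Int.ModEq.refl acc).add ((hm _).mul_right p)
      have h3 : (acc + v % pvM * p) + hornerB r vs * (p * r)
          = acc + (hornerB r vs * r + v % pvM) * p := by ring
      exact (h1.trans (h3 ▸ h2.symm))

theorem perChallenge_eq (vals : List Int) (offset r : Int) :
    chunkLoopA r vals 0 (pvPowMul r offset)
      = PySem.Int.mod (hornerB r vals * pvPowMul r offset) pvM := by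
  rw [loopA_eq r vals 0 _ (by decide), PySem.Int.mod_eq_emod_of_pos pvM_pos]
  ring_nf

theorem foldl_append_map (f : Int → Int) (cs : List Int) : ∀ (init : List Int),
    cs.foldl (fun l r => l ++ [f r]) init = init ++ cs.map f := by
  induction cs with
  | nil => intro init; simp
  | cons c cs ih => intro init; simp [List.foldl_cons, ih]

-- ===== VERDICT (by name: the statement is the Claim_ definition above) =====
theorem chunk_sketch_spec : Claim_equal_chunk_sketch := by
  intro values offset challenges _ _
  show chunk_sketch values offset challenges = chunk_sketch_alt values offset challenges
  unfold chunk_sketch chunk_sketch_alt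
  rw [foldl_append_map (fun r => chunkLoopA r values 0 (pvPowMul r offset)) challenges []]
  simp only [List.nil_append]
  refine List.map_congr_left ?_
  intro r _
  exact (hornerB_eq_foldr r values) ▸ perChallenge_eq values offset r
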